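-- pv_equiv track=rewrite | github.com/andregeorgis/6x6-Calcudoku-Solver | calcudoku.py | check_grid
-- ===== SOURCE A (Python) =====
-- def check_row_or_col(ls):
--     for i in range(0, len(ls)):
--         for j in range(i + 1, len(ls)):
--             if ls[i] == ls[j] or ls[i] == 0 or ls[j] == 0:
--                 return False
--
--
--     return True
--
-- def check_grid(grid):
--
--     for row in grid:
--         condition = check_row_or_col(row)
--         if not condition:
--             return False
--
--     for i in range(6):
--         col = [grid[i][0], grid[i][1], grid[i][2], grid[i][3], grid[i][4], grid[i][5]]
--         condition = check_row_or_col(col)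
--         if not condition:
--             return False
--
--     return True
-- ===== SOURCE B (Python) =====
-- def _valid(ls):
--     return 0 not in ls and len(set(ls)) == len(ls)
--
-- def check_grid(grid):
--     for row in grid:
--         if not _valid(row):
--             return False
--     for i in range(6):
--         if not _valid([grid[i][j] for j in range(6)]):
--             return False
--     return True
-- ===== Notes on version B (the rewrite author's own statement) =====
-- stated objective: simpler
-- what changed: Replaces the quadratic nested pairwise duplicate/zero scan per list with a linear membership test plus set-size comparison in a shared helper, keeping check_grid's two-phase shape (including its second loop that re-checks the first six rows rather than columns).
-- intended difference: On grids containing the single-cell row [0] while every row passes A's pairwise check and the grid has at least 6 rows whose first six rows have at least 6 entries, A returns True (its pairwise loop never examines a lone element, so a lone 0 slips through) while B returns False, the intended verdict since 0 marks an unfilled cell. — e.g. on check_grid([[1, 2, 3, 4, 5, 6], [1, 2, 3, 4, 5, 6], [1, 2, 3, 4, 5, 6], [1, 2, 3, 4, 5, 6], [1, 2, 3, 4, 5, 6], [1, 2, 3, 4, 5, 6]…): A returns true, B returns false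
-- crash fix: On grids containing a lone [0] row whose rows all pass A's pairwise row check but which lack 6 rows of at least 6 entries, A raises IndexError in its second loop while B returns False (B rejects the [0] row in its first pass). — e.g. on check_grid([[0]]): A raises IndexError, B returns false
import Mathlib
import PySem

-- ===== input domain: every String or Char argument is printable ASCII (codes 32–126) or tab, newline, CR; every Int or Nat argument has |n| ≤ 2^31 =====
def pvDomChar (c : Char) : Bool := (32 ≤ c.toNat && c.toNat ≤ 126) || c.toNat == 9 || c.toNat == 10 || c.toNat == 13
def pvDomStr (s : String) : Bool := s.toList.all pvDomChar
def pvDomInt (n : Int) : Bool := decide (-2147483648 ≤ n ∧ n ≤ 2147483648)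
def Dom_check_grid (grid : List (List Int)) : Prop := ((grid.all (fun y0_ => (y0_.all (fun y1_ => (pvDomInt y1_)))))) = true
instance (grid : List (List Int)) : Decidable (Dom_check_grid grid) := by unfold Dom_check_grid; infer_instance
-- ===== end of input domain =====

-- B replaces A's quadratic pairwise zero/duplicate scan by a linear membership + set-size test
-- in a shared helper (keeping check_grid's two-phase shape); B is simpler, and it returns False
-- (intended) on the degenerate lone-[0] rows that A's pairwise loop never inspects.

-- ===== PORT A =====
def check_row_or_col (ls : List Int) : Bool :=
  (PySem.List.pyRange 0 (ls.length : Int) 1).all (fun i =>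
    (PySem.List.pyRange (i + 1) (ls.length : Int) 1).all (fun j =>
      !(PySem.List.pyGetD ls i 0 == PySem.List.pyGetD ls j 0 ||
        PySem.List.pyGetD ls i 0 == 0 || PySem.List.pyGetD ls j 0 == 0)))

def check_grid (grid : List (List Int)) : Bool :=
  if grid.all (fun row => check_row_or_col row) then
    (PySem.List.pyRange 0 6 1).all (fun i =>
      let row := PySem.List.pyGetD grid i []
      let col := [PySem.List.pyGetD row 0 0, PySem.List.pyGetD row 1 0,
                  PySem.List.pyGetD row 2 0, PySem.List.pyGetD row 3 0,
                  PySem.List.pyGetD row 4 0, PySem.List.pyGetD row 5 0]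
      check_row_or_col col)
  else false

-- ===== PORT B =====
def pv_valid (ls : List Int) : Bool :=
  !(ls.contains 0) && ((PySem.Set.ofList ls).length == ls.length)

def check_grid_alt (grid : List (List Int)) : Bool :=
  if grid.all (fun row => pv_valid row) then
    (PySem.List.pyRange 0 6 1).all (fun i =>
      pv_valid ((PySem.List.pyRange 0 6 1).map (fun j =>
        PySem.List.pyGetD (PySem.List.pyGetD grid i []) j 0)))
  else false

-- ===== PRECONDITION & SPEC =====
-- Pre_ excludes exactly the inputs on which A raises IndexError: grids whose rows all pass
-- A's row check but which lack 6 rows, or whose first six rows lack 6 entries (the column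
-- loop indexes grid[i][0..5] there).
def Pre_check_grid (grid : List (List Int)) : Prop :=
  (∀ r ∈ grid, r.length ≤ 1 ∨ (0 ∉ r ∧ r.Nodup)) →
    (6 ≤ grid.length ∧ ∀ r ∈ grid.take 6, 6 ≤ r.length)
instance (grid : List (List Int)) : Decidable (Pre_check_grid grid) := by
  unfold Pre_check_grid; infer_instance

def pvWitness_check_grid : List (List Int) := [[0, 0]]

-- On grids containing a lone [0] row whose rows all pass A's row check but which lack the
-- 6-by-at-least-6 shape, A raises IndexError in its second loop; B returns False there.
def Raises_check_grid (grid : List (List Int)) : Prop :=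
  [0] ∈ grid ∧ (∀ r ∈ grid, r.length ≤ 1 ∨ (0 ∉ r ∧ r.Nodup)) ∧
    ¬(6 ≤ grid.length ∧ ∀ r ∈ grid.take 6, 6 ≤ r.length)
instance (grid : List (List Int)) : Decidable (Raises_check_grid grid) := by
  unfold Raises_check_grid; infer_instance

def pvRaiseWitness_check_grid : List (List Int) := [[0]]
def pvRaiseWitnessOut_check_grid : Bool := false

-- On grids containing the single-cell row [0] while every row passes A's pairwise check and the
-- grid has at least 6 rows whose first six rows have at least 6 entries, A returns True (its
-- pairwise loop never examines a lone element, so a lone 0 slips through) while B returns False,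
-- the intended verdict since 0 marks an unfilled cell.
def D_check_grid (grid : List (List Int)) : Prop :=
  [0] ∈ grid ∧
  (∀ r ∈ grid, r.length ≤ 1 ∨ (0 ∉ r ∧ r.Nodup)) ∧
  6 ≤ grid.length ∧ (∀ r ∈ grid.take 6, 6 ≤ r.length)
instance (grid : List (List Int)) : Decidable (D_check_grid grid) := by
  unfold D_check_grid; infer_instance

def Spec_check_grid (grid : List (List Int)) (out : Bool) : Prop :=
  ¬ D_check_grid grid → out = check_grid_alt grid
instance (grid : List (List Int)) (out : Bool) : Decidable (Spec_check_grid grid out) := by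
  unfold Spec_check_grid; infer_instance

def pvDiffWitness_check_grid : List (List Int) :=
  [[1, 2, 3, 4, 5, 6], [1, 2, 3, 4, 5, 6], [1, 2, 3, 4, 5, 6],
   [1, 2, 3, 4, 5, 6], [1, 2, 3, 4, 5, 6], [1, 2, 3, 4, 5, 6], [0]]
def pvDiffWitnessOut_check_grid : Bool × Bool := (true, false)

-- ===== CLAIM (what is proved, stated in full; the proofs are below) =====
def Claim_unchanged_check_grid : Prop := ∀ (grid : List (List Int)), Dom_check_grid grid → Pre_check_grid grid → Spec_check_grid grid (check_grid grid)
def Claim_changed_check_grid : Prop := Dom_check_grid (pvDiffWitness_check_grid) ∧ Pre_check_grid (pvDiffWitness_check_grid) ∧ D_check_grid (pvDiffWitness_check_grid) ∧ check_grid (pvDiffWitness_check_grid) = pvDiffWitnessOut_check_grid.1 ∧ check_grid_alt (pvDiffWitness_check_grid) = pvDiffWitnessOut_check_grid.2 ∧ pvDiffWitnessOut_check_grid.1 ≠ pvDiffWitnessOut_check_grid.2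
def Claim_exact_check_grid : Prop := ∀ (grid : List (List Int)), Dom_check_grid grid → Pre_check_grid grid → D_check_grid grid → check_grid grid ≠ check_grid_alt grid
def Claim_raises_check_grid : Prop := (∀ (grid : List (List Int)), Dom_check_grid grid → Raises_check_grid grid → ¬ Pre_check_grid grid) ∧ (Dom_check_grid (pvRaiseWitness_check_grid) ∧ Raises_check_grid (pvRaiseWitness_check_grid) ∧ check_grid_alt (pvRaiseWitness_check_grid) = pvRaiseWitnessOut_check_grid)

-- ===== LEMMAS AND PROOFS =====

-- A's row check, read off its nested index loops.
lemma crc_P (ls : List Int) :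
    check_row_or_col ls = true ↔
      ∀ (a b : Nat) (hab : a < b) (hb : b < ls.length),
        ls[a]'(by omega) ≠ ls[b] ∧ ls[a]'(by omega) ≠ 0 ∧ ls[b] ≠ 0 := by
  unfold check_row_or_col
  simp only [List.all_eq_true]
  constructor
  · intro h a b hab hb
    have ha : a < ls.length := by omega
    have hj := h (a : Int) (by
      rw [PySem.List.mem_pyRange_one]
      exact ⟨Int.natCast_nonneg a, by exact_mod_cast ha⟩) (b : Int) (by
      rw [PySem.List.mem_pyRange_one]
      constructor
      · omega
      · exact_mod_cast hb)
    simp only [PySem.List.pyGetD_natCast, List.getD_eq_getElem?_getD,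
      List.getElem?_eq_getElem ha, List.getElem?_eq_getElem hb, Option.getD_some] at hj
    refine ⟨?_, ?_, ?_⟩ <;> intro e <;> rw [e] at hj <;> simp at hj
  · intro h i hi j hj
    rw [PySem.List.mem_pyRange_one] at hi
    obtain ⟨hi0, hilt⟩ := hi
    rw [PySem.List.mem_pyRange_one] at hj
    obtain ⟨hj1, hjlt⟩ := hj
    have hj0 : (0 : Int) ≤ j := by omega
    have ha : i.toNat < ls.length := by omega
    have hb : j.toNat < ls.length := by omega
    have hab : i.toNat < j.toNat := by omega
    have h3 := h i.toNat j.toNat hab hb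
    rw [← Int.toNat_of_nonneg hi0, ← Int.toNat_of_nonneg hj0]
    simp only [PySem.List.pyGetD_natCast, List.getD_eq_getElem?_getD,
      List.getElem?_eq_getElem ha, List.getElem?_eq_getElem hb, Option.getD_some]
    simp
    exact ⟨⟨h3.1, h3.2.1⟩, h3.2.2⟩

-- A's row check is: length ≤ 1, or zero-free and duplicate-free.
lemma crc_iff (ls : List Int) :
    check_row_or_col ls = true ↔ ls.length ≤ 1 ∨ (0 ∉ ls ∧ ls.Nodup) := by
  rw [crc_P]
  by_cases hlen : ls.length ≤ 1
  · constructor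
    · intro _; exact Or.inl hlen
    · intro _ a b hab hb; exact absurd hb (by omega)
  · push_neg at hlen
    constructor
    · intro h
      refine Or.inr ⟨?_, ?_⟩
      · intro hmem
        obtain ⟨k, hk, hk0⟩ := List.mem_iff_getElem.mp hmem
        by_cases hk1 : k + 1 < ls.length
        · exact (h k (k + 1) (Nat.lt_succ_self k) hk1).2.1 hk0
        · exact (h 0 k (by omega) hk).2.2 hk0
      · rw [List.nodup_iff_getElem?_ne_getElem?]
        intro i j hij hj
        have hi : i < ls.length := by omega
        rw [List.getElem?_eq_getElem hi, List.getElem?_eq_getElem hj]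
        simp only [ne_eq, Option.some.injEq]
        exact (h i j hij hj).1
    · rintro (h1 | ⟨h0, hnd⟩)
      · intro a b hab hb; exact absurd h1 (by omega)
      · intro a b hab hb
        have ha : a < ls.length := by omega
        refine ⟨?_, ?_, ?_⟩
        · intro e
          have hne := List.nodup_iff_getElem?_ne_getElem?.mp hnd a b hab hb
          rw [List.getElem?_eq_getElem ha, List.getElem?_eq_getElem hb] at hne
          exact hne (by rw [e])
        · exact fun e => h0 (e ▸ List.getElem_mem ha)
        · exact fun e => h0 (e ▸ List.getElem_mem hb)

-- set(r) has as many elements as r exactly when r has no duplicates.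
lemma ofList_length_iff (r : List Int) :
    (PySem.Set.ofList r).length = r.length ↔ r.Nodup := by
  have hperm : (PySem.Set.ofList r).Perm r.dedup := by
    rw [List.perm_ext_iff_of_nodup (PySem.Set.nodup_ofList r) (List.nodup_dedup r)]
    intro a
    rw [PySem.Set.mem_ofList, List.mem_dedup]
  rw [hperm.length_eq]
  constructor
  · intro h
    exact List.dedup_eq_self.mp ((List.dedup_sublist r).eq_of_length h)
  · intro h
    rw [List.dedup_eq_self.mpr h]

-- B's validity helper.
lemma pv_valid_iff (r : List Int) :
    pv_valid r = true ↔ 0 ∉ r ∧ r.Nodup := by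
  unfold pv_valid
  rw [Bool.and_eq_true]
  constructor
  · rintro ⟨h1, h2⟩
    refine ⟨by simpa using h1, ?_⟩
    exact (ofList_length_iff r).mp (by simpa using h2)
  · rintro ⟨h0, hnd⟩
    exact ⟨by simpa using h0, by simpa using (ofList_length_iff r).mpr hnd⟩

lemma col_eq_take (row : List Int) (h : 6 ≤ row.length) :
    [PySem.List.pyGetD row 0 0, PySem.List.pyGetD row 1 0,
     PySem.List.pyGetD row 2 0, PySem.List.pyGetD row 3 0,
     PySem.List.pyGetD row 4 0, PySem.List.pyGetD row 5 0] = row.take 6 := by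
  rcases row with _ | ⟨a, row⟩
  · exact absurd h (by simp)
  rcases row with _ | ⟨b, row⟩
  · exact absurd h (by simp)
  rcases row with _ | ⟨c, row⟩
  · exact absurd h (by simp)
  rcases row with _ | ⟨d, row⟩
  · exact absurd h (by simp)
  rcases row with _ | ⟨e, row⟩
  · exact absurd h (by simp)
  rcases row with _ | ⟨f, row⟩
  · exact absurd h (by simp)
  simp [PySem.List.pyGetD, PySem.List.pyGet?, PySem.List.pyIdx?, List.take]
  refine ⟨?_, ?_, ?_, ?_, ?_, ?_⟩ <;> rw [if_pos (by omega)] <;> rfl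

-- Under the row condition and the 6-by-at-least-6 shape, A returns true.
lemma check_grid_true (grid : List (List Int))
    (hrows : ∀ r ∈ grid, r.length ≤ 1 ∨ (0 ∉ r ∧ r.Nodup))
    (hlen : 6 ≤ grid.length) (hshape : ∀ r ∈ grid.take 6, 6 ≤ r.length) :
    check_grid grid = true := by
  unfold check_grid
  have hall : grid.all (fun row => check_row_or_col row) = true := by
    rw [List.all_eq_true]
    intro r hr
    exact (crc_iff r).mpr (hrows r hr)
  rw [if_pos hall]
  simp only [List.all_eq_true]
  intro i hi
  rw [PySem.List.mem_pyRange_one] at hi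
  obtain ⟨hi0, hi6⟩ := hi
  have hidx : i.toNat < grid.length := by omega
  have hrow : PySem.List.pyGetD grid i [] = grid[i.toNat] :=
    PySem.List.pyGetD_eq_getElem grid [] hi0 (by omega)
  have hkl : i.toNat < (grid.take 6).length := by
    rw [List.length_take]; omega
  have hmem6 : grid[i.toNat] ∈ grid.take 6 := by
    have hm := List.getElem_mem hkl
    rwa [List.getElem_take] at hm
  have h6r : 6 ≤ (grid[i.toNat]).length := hshape _ hmem6
  have hgood : 0 ∉ grid[i.toNat] ∧ (grid[i.toNat]).Nodup := by
    rcases hrows _ (List.getElem_mem hidx) with hle | hg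
    · omega
    · exact hg
  show check_row_or_col
      [PySem.List.pyGetD (PySem.List.pyGetD grid i []) 0 0,
       PySem.List.pyGetD (PySem.List.pyGetD grid i []) 1 0,
       PySem.List.pyGetD (PySem.List.pyGetD grid i []) 2 0,
       PySem.List.pyGetD (PySem.List.pyGetD grid i []) 3 0,
       PySem.List.pyGetD (PySem.List.pyGetD grid i []) 4 0,
       PySem.List.pyGetD (PySem.List.pyGetD grid i []) 5 0] = true
  rw [hrow, col_eq_take _ h6r]
  apply (crc_iff _).mpr
  refine Or.inr ⟨?_, ?_⟩
  · exact fun hz => hgood.1 ((List.take_sublist 6 _).subset hz)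
  · exact List.Nodup.sublist (List.take_sublist 6 _) hgood.2

-- If some row fails B's helper, B stops in its first loop.
lemma alt_false (grid : List (List Int)) (r : List Int) (hr : r ∈ grid)
    (hbad : ¬(0 ∉ r ∧ r.Nodup)) : check_grid_alt grid = false := by
  unfold check_grid_alt
  have hf : grid.all (fun row => pv_valid row) = false := by
    apply Bool.eq_false_iff.mpr
    intro hc
    rw [List.all_eq_true] at hc
    exact hbad ((pv_valid_iff r).mp (hc r hr))
  rw [hf]
  simp

-- Under B's row condition and the 6-by-at-least-6 shape, B returns true.
lemma alt_true (grid : List (List Int))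
    (hrows : ∀ r ∈ grid, 0 ∉ r ∧ r.Nodup)
    (hlen : 6 ≤ grid.length) (hshape : ∀ r ∈ grid.take 6, 6 ≤ r.length) :
    check_grid_alt grid = true := by
  unfold check_grid_alt
  have hall : grid.all (fun row => pv_valid row) = true := by
    rw [List.all_eq_true]
    intro r hr
    exact (pv_valid_iff r).mpr (hrows r hr)
  rw [if_pos hall]
  simp only [List.all_eq_true]
  intro i hi
  rw [PySem.List.mem_pyRange_one] at hi
  obtain ⟨hi0, hi6⟩ := hi
  have hidx : i.toNat < grid.length := by omega
  have hrow : PySem.List.pyGetD grid i [] = grid[i.toNat] :=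
    PySem.List.pyGetD_eq_getElem grid [] hi0 (by omega)
  have hkl : i.toNat < (grid.take 6).length := by
    rw [List.length_take]; omega
  have hmem6 : grid[i.toNat] ∈ grid.take 6 := by
    have hm := List.getElem_mem hkl
    rwa [List.getElem_take] at hm
  have h6r : 6 ≤ (grid[i.toNat]).length := hshape _ hmem6
  have hgood := hrows _ (List.getElem_mem hidx)
  show pv_valid ((PySem.List.pyRange 0 6 1).map (fun j =>
      PySem.List.pyGetD (PySem.List.pyGetD grid i []) j 0)) = true
  rw [hrow, show PySem.List.pyRange 0 6 1 = [0, 1, 2, 3, 4, 5] from by decide]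
  simp only [List.map]
  rw [col_eq_take _ h6r]
  refine (pv_valid_iff _).mpr ⟨?_, ?_⟩
  · exact fun hz => hgood.1 ((List.take_sublist 6 _).subset hz)
  · exact List.Nodup.sublist (List.take_sublist 6 _) hgood.2

-- ===== VERDICT (by name: the statement is the Claim_ definition above) =====
theorem check_grid_spec : Claim_unchanged_check_grid := by
  intro grid _ hpre
  unfold Spec_check_grid
  intro hnd
  by_cases hall : ∀ r ∈ grid, r.length ≤ 1 ∨ (0 ∉ r ∧ r.Nodup)
  · obtain ⟨hlen, hshape⟩ := hpre hall
    rw [check_grid_true grid hall hlen hshape]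
    have h0g : [0] ∉ grid := fun hmem => hnd ⟨hmem, hall, hlen, hshape⟩
    have hrowsB : ∀ r ∈ grid, 0 ∉ r ∧ r.Nodup := by
      intro r hr
      rcases hall r hr with hle | hgood
      · rcases r with _ | ⟨x, _ | ⟨y, t⟩⟩
        · simp
        · constructor
          · intro hx
            apply h0g
            have hx0 : 0 = x := by simpa using hx
            rwa [← hx0] at hr
          · simp
        · exfalso; simp at hle
      · exact hgood
    rw [alt_true grid hrowsB hlen hshape]
  · push_neg at hall
    obtain ⟨r, hr, hlen1, himp⟩ := hall
    have hcond : ¬(r.length ≤ 1 ∨ (0 ∉ r ∧ r.Nodup)) := by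
      rintro (h | ⟨ha, hb⟩)
      · omega
      · exact himp ha hb
    have hA : check_grid grid = false := by
      unfold check_grid
      have hf : grid.all (fun row => check_row_or_col row) = false := by
        apply Bool.eq_false_iff.mpr
        intro hc
        rw [List.all_eq_true] at hc
        exact hcond ((crc_iff r).mp (hc r hr))
      rw [hf]
      simp
    have hB : check_grid_alt grid = false :=
      alt_false grid r hr (fun hg => hcond (Or.inr hg))
    rw [hA, hB]

theorem check_grid_changed : Claim_changed_check_grid := by
  unfold Claim_changed_check_grid; decide

theorem check_grid_tight : Claim_exact_check_grid := by
  intro grid _ hpre hD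
  obtain ⟨hmem, hall, hlen, hshape⟩ := hD
  rw [check_grid_true grid hall hlen hshape]
  have hB : check_grid_alt grid = false :=
    alt_false grid [0] hmem (fun hg => hg.1 (List.mem_singleton.mpr rfl))
  rw [hB]
  simp

@[simp] theorem check_grid_raises : Claim_raises_check_grid := by
  unfold Claim_raises_check_grid
  exact ⟨fun grid _ hr hp => hr.2.2 (hp hr.2.1), by decide⟩
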